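-- pv_equiv track=rewrite | github.com/ben-128/BaB-GameplayPatch | WIP/TrapDamage/dump_deep_region.py | scan_nonzero_regions
-- ===== SOURCE A (Python) =====
-- def scan_nonzero_regions(data, start, end, granularity=16):
--     """Find contiguous non-zero regions."""
--     regions = []
--     in_nonzero = False
--     region_start = 0
--
--     for i in range(start, end, granularity):
--         chunk = data[i:i+granularity]
--         is_nz = any(b != 0 for b in chunk)
--
--         if is_nz and not in_nonzero:
--             region_start = i
--             in_nonzero = True
--         elif not is_nz and in_nonzero:
--             regions.append((region_start, i))
--             in_nonzero = False
--
--     if in_nonzero: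
--         regions.append((region_start, end))
--
--     return regions
-- ===== SOURCE B (Python) =====
-- def scan_nonzero_regions(data, start, end, granularity=16):
--     """Find contiguous non-zero regions via rising/falling edge detection."""
--     idxs = list(range(start, end, granularity))
--     flags = [any(b != 0 for b in data[i:i + granularity]) for i in idxs]
--     padded = [False] + flags + [False]
--     starts = [i for i, f, p in zip(idxs, flags, padded) if f and not p]
--     ends = [i for i, f, p in zip(idxs + [end], flags + [False], padded) if not f and p]
--     return list(zip(starts, ends))
-- ===== Notes on version B (the rewrite author's own statement) =====
-- stated objective: idiomatic
-- what changed: Replaces A's explicit toggle state machine (in_nonzero/region_start mutated across the loop) by a stateless edge-detection decomposition: compute the per-chunk flag list once, pad it with False on both sides, read region starts as rising edges and region ends as falling edges of zipped shifted lists, and zip the two edge lists into region pairs.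
-- outside the precondition, e.g. on scan_nonzero_regions([1, 2, 3], 0, 3, 0): A raises ValueError, B raises ValueError
import Mathlib
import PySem

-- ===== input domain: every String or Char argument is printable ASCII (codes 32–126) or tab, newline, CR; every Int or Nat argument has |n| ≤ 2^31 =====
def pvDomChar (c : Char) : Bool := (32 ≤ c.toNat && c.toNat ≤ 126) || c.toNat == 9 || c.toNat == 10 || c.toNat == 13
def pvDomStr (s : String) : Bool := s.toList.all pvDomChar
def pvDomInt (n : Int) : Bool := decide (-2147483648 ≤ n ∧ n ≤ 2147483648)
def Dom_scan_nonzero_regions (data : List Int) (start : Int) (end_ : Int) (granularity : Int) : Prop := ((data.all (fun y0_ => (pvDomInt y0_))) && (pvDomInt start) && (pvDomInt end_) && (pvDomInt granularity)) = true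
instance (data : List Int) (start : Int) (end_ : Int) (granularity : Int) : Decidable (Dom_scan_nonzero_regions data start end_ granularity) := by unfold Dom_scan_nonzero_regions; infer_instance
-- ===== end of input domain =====

-- B replaces A's explicit toggle state machine by a rising/falling edge-detection over the
-- padded list of per-chunk flags (idiomatic zip-of-shifted-lists decomposition; same cost).

-- ===== PORT A =====
-- loop body of A's for-loop, one step of the state machine (regions, in_nonzero, region_start)
def pvStepA (data : List Int) (granularity : Int)
    (s : List (Int × Int) × Bool × Int) (i : Int) : List (Int × Int) × Bool × Int :=
  let chunk := PySem.List.slice data (some i) (some (i + granularity))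
  let is_nz := chunk.any (fun b => b != 0)
  if is_nz && !s.2.1 then (s.1, true, i)
  else if !is_nz && s.2.1 then (s.1 ++ [(s.2.2, i)], false, s.2.2)
  else s

def scan_nonzero_regions (data : List Int) (start : Int) (end_ : Int) (granularity : Int) : List (Int × Int) :=
  let st := (PySem.List.pyRange start end_ granularity).foldl (pvStepA data granularity) ([], false, 0)
  if st.2.1 then st.1 ++ [(st.2.2, end_)] else st.1

-- ===== PORT B =====
-- zip of three lists, truncating at the shortest (Python's zip)
def pvZip3 {α β γ : Type} : List α → List β → List γ → List (α × β × γ)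
  | a :: as, b :: bs, c :: cs => (a, b, c) :: pvZip3 as bs cs
  | _, _, _ => []

def scan_nonzero_regions_alt (data : List Int) (start : Int) (end_ : Int) (granularity : Int) : List (Int × Int) :=
  let idxs := PySem.List.pyRange start end_ granularity
  let flags := idxs.map (fun i =>
    (PySem.List.slice data (some i) (some (i + granularity))).any (fun b => b != 0))
  let padded := false :: flags ++ [false]
  let starts := ((pvZip3 idxs flags padded).filter (fun t => t.2.1 && !t.2.2)).map (·.1)
  let ends := ((pvZip3 (idxs ++ [end_]) (flags ++ [false]) padded).filter
      (fun t => !t.2.1 && t.2.2)).map (·.1)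
  starts.zip ends

-- ===== PRECONDITION & SPEC =====
-- Pre_ excludes granularity = 0, on which Python's range raises ValueError.
def Pre_scan_nonzero_regions (data : List Int) (start : Int) (end_ : Int) (granularity : Int) : Prop :=
  granularity ≠ 0
instance (data : List Int) (start : Int) (end_ : Int) (granularity : Int) : Decidable (Pre_scan_nonzero_regions data start end_ granularity) := by unfold Pre_scan_nonzero_regions; infer_instance

def pvWitness_scan_nonzero_regions : List Int × Int × Int × Int := ([1, 0, 2], 0, 3, 1)

def Spec_scan_nonzero_regions (data : List Int) (start : Int) (end_ : Int) (granularity : Int) (out : List (Int × Int)) : Prop := out = scan_nonzero_regions_alt data start end_ granularity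
instance (data : List Int) (start : Int) (end_ : Int) (granularity : Int) (out : List (Int × Int)) : Decidable (Spec_scan_nonzero_regions data start end_ granularity out) := by unfold Spec_scan_nonzero_regions; infer_instance

-- ===== CLAIM (what is proved, stated in full; the proofs are below) =====
def Claim_equal_scan_nonzero_regions : Prop := ∀ (data : List Int) (start : Int) (end_ : Int) (granularity : Int), Dom_scan_nonzero_regions data start end_ granularity → Pre_scan_nonzero_regions data start end_ granularity → Spec_scan_nonzero_regions data start end_ granularity (scan_nonzero_regions data start end_ granularity)

-- ===== LEMMAS AND PROOFS =====

-- recursive characterisations of B's edge lists (proof-side only)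
def pvStarts (g : Int → Bool) : List Int → Bool → List Int
  | [], _ => []
  | i :: t, prev => (if g i && !prev then [i] else []) ++ pvStarts g t (g i)

def pvEnds (g : Int → Bool) (e : Int) : List Int → Bool → List Int
  | [], prev => if prev then [e] else []
  | i :: t, prev => (if !(g i) && prev then [i] else []) ++ pvEnds g e t (g i)

theorem pvStarts_eq (g : Int → Bool) :
    ∀ (l : List Int) (prev : Bool) (rest : List Bool),
      ((pvZip3 l (l.map g) (prev :: l.map g ++ rest)).filter (fun t => t.2.1 && !t.2.2)).map (·.1)
        = pvStarts g l prev := by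
  intro l
  induction l with
  | nil => intro prev rest; simp [pvZip3, pvStarts]
  | cons i t ih =>
    intro prev rest
    simp only [List.map_cons, List.cons_append, pvZip3, List.filter_cons, pvStarts]
    cases hgi : g i <;> cases prev <;> simpa [hgi] using ih (g i) rest

theorem pvEnds_eq (g : Int → Bool) (e : Int) :
    ∀ (l : List Int) (prev : Bool) (rest : List Bool),
      ((pvZip3 (l ++ [e]) (l.map g ++ [false]) (prev :: l.map g ++ rest)).filter
          (fun t => !t.2.1 && t.2.2)).map (·.1)
        = pvEnds g e l prev := by
  intro l
  induction l with
  | nil =>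
    intro prev rest
    by_cases h : prev <;> simp [pvZip3, pvEnds, h]
  | cons i t ih =>
    intro prev rest
    simp only [List.map_cons, List.cons_append, pvZip3, List.filter_cons, pvEnds]
    cases hgi : g i <;> cases prev <;> simpa [hgi] using ih (g i) rest

-- pvStepA rewritten through the flag function
theorem pvStepA_eq (data : List Int) (granularity : Int)
    (s : List (Int × Int) × Bool × Int) (i : Int) :
    pvStepA data granularity s i =
      (if (PySem.List.slice data (some i) (some (i + granularity))).any (fun b => b != 0) && !s.2.1
        then (s.1, true, i)
        else if !((PySem.List.slice data (some i) (some (i + granularity))).any (fun b => b != 0)) && s.2.1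
        then (s.1 ++ [(s.2.2, i)], false, s.2.2)
        else s) := rfl

-- the state-machine loop, finalized with end_, equals acc ++ zip of the edge lists
theorem pvLoop_eq (data : List Int) (granularity end_ : Int)
    (g : Int → Bool)
    (hg : ∀ i, g i = (PySem.List.slice data (some i) (some (i + granularity))).any (fun b => b != 0)) :
    ∀ (l : List Int) (acc : List (Int × Int)) (inz : Bool) (rs : Int),
      (let st := l.foldl (pvStepA data granularity) (acc, inz, rs);
        if st.2.1 then st.1 ++ [(st.2.2, end_)] else st.1)
      = acc ++ (((if inz then [rs] else []) ++ pvStarts g l inz).zip (pvEnds g end_ l inz)) := by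
  intro l
  induction l with
  | nil =>
    intro acc inz rs
    cases inz <;> simp [pvStarts, pvEnds]
  | cons i t ih =>
    intro acc inz rs
    simp only [List.foldl_cons, pvStepA_eq, ← hg i]
    cases hgi : g i <;> cases inz <;>
      simp [hgi, pvStarts, pvEnds, ih, List.zip_cons_cons, List.append_assoc]

-- ===== VERDICT (by name: the statement is the Claim_ definition above) =====
theorem scan_nonzero_regions_spec : Claim_equal_scan_nonzero_regions := by
  unfold Claim_equal_scan_nonzero_regions
  intro data start end_ granularity _ _
  unfold Spec_scan_nonzero_regions scan_nonzero_regions scan_nonzero_regions_alt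
  set g : Int → Bool :=
    fun i => (PySem.List.slice data (some i) (some (i + granularity))).any (fun b => b != 0) with hgdef
  have hg : ∀ i, g i = (PySem.List.slice data (some i) (some (i + granularity))).any (fun b => b != 0) := by
    intro i; rfl
  have h := pvLoop_eq data granularity end_ g hg (PySem.List.pyRange start end_ granularity) [] false 0
  simp only [List.nil_append, if_neg Bool.false_ne_true] at h
  simp only [h]
  rw [pvStarts_eq g _ false [false], pvEnds_eq g end_ _ false [false]]
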